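-- pv_equiv track=rewrite | github.com/RomanRetsen/code_clash | walker_tasks/labs109.py | taxi_zum_zum
-- ===== SOURCE A (Python) =====
-- def taxi_zum_zum(moves):
--     current_location = [0, 0]
--     current_vector = "N"
--     move_adjust = {"N": (0,1), "S": (0,-1), "E":(1, 0), "W":(-1, 0)}
--     vector_adjust = {"L":{"N":"W", "S":"E", "E":"N", "W":"S"}, "R":{"N":"E", "S":"W", "E":"S", "W":"N"}}
--
--     for move in moves:
--         if move == "F":
--             current_location[0] += move_adjust[current_vector][0]
--             current_location[1] += move_adjust[current_vector][1]
--         elif move in vector_adjust.keys():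
--             current_vector = vector_adjust[move][current_vector]
--     return tuple(current_location)
-- ===== SOURCE B (Python) =====
-- def taxi_zum_zum(moves):
--     # Pass 1: heading (net left-turn count) in effect before each move, as prefix sums.
--     heads = [0]
--     for c in moves:
--         heads.append(heads[-1] + (c == 'L') - (c == 'R'))
--     # Pass 2: tally F-moves per heading residue.
--     counts = [0, 0, 0, 0]
--     for c, h in zip(moves, heads):
--         if c == 'F':
--             counts[h % 4] += 1
--     # Closed-form combination: residues 0,1,2,3 = N,W,S,E.
--     return (counts[3] - counts[1], counts[0] - counts[2])
-- ===== Notes on version B (the rewrite author's own statement) =====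
-- stated objective: alternative
-- what changed: Replaces the step-by-step position simulation with two staged passes: first compute heading prefix sums (net left turns before each move), then tally F-moves per heading residue, and finally obtain the coordinates as a closed-form difference of the four counts.
import Mathlib
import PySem

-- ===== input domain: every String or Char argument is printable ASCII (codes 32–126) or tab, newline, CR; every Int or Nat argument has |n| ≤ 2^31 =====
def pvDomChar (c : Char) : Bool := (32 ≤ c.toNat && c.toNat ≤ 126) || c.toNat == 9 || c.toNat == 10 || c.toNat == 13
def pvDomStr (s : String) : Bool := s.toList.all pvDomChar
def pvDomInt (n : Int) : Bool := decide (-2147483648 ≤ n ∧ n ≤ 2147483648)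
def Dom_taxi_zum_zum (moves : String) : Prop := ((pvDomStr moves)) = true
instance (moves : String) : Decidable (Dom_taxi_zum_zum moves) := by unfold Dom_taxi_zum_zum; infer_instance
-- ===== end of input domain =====

-- B replaces A's step-by-step position simulation by two staged passes (heading prefix
-- sums, then per-residue F-counts) combined by a closed-form difference (objective: alternative).

-- ===== PORT A =====
-- Python's 1-character move/heading strings are ported as Char; the two dicts are PySem.Dicts.
-- getD's defaults are never used: the heading is always one of the four keys.
def taxiMoveAdjust : PySem.Dict Char (Int × Int) :=
  PySem.Dict.ofList [('N', (0, 1)), ('S', (0, -1)), ('E', (1, 0)), ('W', (-1, 0))]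

def taxiVectorAdjust : PySem.Dict Char (PySem.Dict Char Char) :=
  PySem.Dict.ofList
    [('L', PySem.Dict.ofList [('N', 'W'), ('S', 'E'), ('E', 'N'), ('W', 'S')]),
     ('R', PySem.Dict.ofList [('N', 'E'), ('S', 'W'), ('E', 'S'), ('W', 'N')])]

def taxiStepA (st : (Int × Int) × Char) (move : Char) : (Int × Int) × Char :=
  if move = 'F' then
    let adj := taxiMoveAdjust.getD st.2 (0, 0)
    ((st.1.1 + adj.1, st.1.2 + adj.2), st.2)
  else if taxiVectorAdjust.contains move then
    (st.1, (taxiVectorAdjust.getD move PySem.Dict.empty).getD st.2 st.2)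
  else st

def taxi_zum_zum (moves : String) : Int × Int :=
  (moves.toList.foldl taxiStepA ((0, 0), 'N')).1

-- ===== PORT B =====
-- (c == 'L') - (c == 'R'): Python bools as ints
def taxiTurn (c : Char) : Int := (if c = 'L' then 1 else 0) - (if c = 'R' then 1 else 0)

-- pass 1 of Source B: `heads = [0]; for c: heads.append(heads[-1] + turn c)` — the list of
-- running prefix sums starting from h, written as the obvious structural recursion
def taxiHeadsFrom (h : Int) : List Char → List Int
  | [] => [h]
  | c :: l => h :: taxiHeadsFrom (h + taxiTurn c) l

-- pass 2 of Source B: `if c == 'F': counts[h % 4] += 1`; the index h % 4 is always in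
-- 0..3 (Python % with positive modulus), so `.toNat` is exact here
def taxiTally (counts : List Int) (p : Char × Int) : List Int :=
  if p.1 = 'F' then
    let r := PySem.Int.mod p.2 4
    counts.set r.toNat (counts.getD r.toNat 0 + 1)
  else counts

def taxi_zum_zum_alt (moves : String) : Int × Int :=
  let heads := taxiHeadsFrom 0 moves.toList
  let counts := (moves.toList.zip heads).foldl taxiTally [0, 0, 0, 0]
  (counts.getD 3 0 - counts.getD 1 0, counts.getD 0 0 - counts.getD 2 0)

-- ===== PRECONDITION & SPEC =====
def Spec_taxi_zum_zum (moves : String) (out : Int × Int) : Prop := out = taxi_zum_zum_alt moves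
instance (moves : String) (out : Int × Int) : Decidable (Spec_taxi_zum_zum moves out) := by unfold Spec_taxi_zum_zum; infer_instance

-- ===== CLAIM (what is proved, stated in full; the proofs are below) =====
def Claim_equal_taxi_zum_zum : Prop := ∀ (moves : String), Dom_taxi_zum_zum moves → Spec_taxi_zum_zum moves (taxi_zum_zum moves)

-- ===== LEMMAS AND PROOFS =====

-- reference displacement: direction per heading residue, heading letter per turn count
def taxiDir (r : Int) : Int × Int :=
  if r = 0 then (0, 1) else if r = 1 then (-1, 0) else if r = 2 then (0, -1) else (1, 0)

def taxiRef : List Char → Int → Int × Int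
  | [], _ => (0, 0)
  | c :: l, t =>
    let d : Int × Int := if c = 'F' then taxiDir (PySem.Int.mod t 4) else (0, 0)
    let rest := taxiRef l (t + taxiTurn c)
    (d.1 + rest.1, d.2 + rest.2)

def taxiHeadOf (t : Int) : Char :=
  if PySem.Int.mod t 4 = 0 then 'N'
  else if PySem.Int.mod t 4 = 1 then 'W'
  else if PySem.Int.mod t 4 = 2 then 'S'
  else 'E'

lemma taxi_mod4 (t : Int) : PySem.Int.mod t 4 = t % 4 :=
  PySem.Int.mod_eq_emod_of_pos (by norm_num)

lemma taxi_stepA_eq (p : Int × Int) (t : Int) (c : Char) :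
    taxiStepA (p, taxiHeadOf t) c =
      ((p.1 + (if c = 'F' then taxiDir (PySem.Int.mod t 4) else (0, 0)).1,
        p.2 + (if c = 'F' then taxiDir (PySem.Int.mod t 4) else (0, 0)).2),
       taxiHeadOf (t + taxiTurn c)) := by
  have hm := taxi_mod4 t
  have hb : 0 ≤ t % 4 ∧ t % 4 < 4 := ⟨Int.emod_nonneg t (by norm_num), Int.emod_lt_of_pos t (by norm_num)⟩
  have hr : t % 4 = 0 ∨ t % 4 = 1 ∨ t % 4 = 2 ∨ t % 4 = 3 := by omega
  by_cases hF : c = 'F'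
  · subst hF
    have ht : t + taxiTurn 'F' = t := by simp [taxiTurn]
    rw [ht]
    rcases hr with h | h | h | h
    · have hmod : PySem.Int.mod t 4 = 0 := hm.trans h
      have hstep : taxiStepA (p, 'N') 'F' = ((p.1 + 0, p.2 + 1), 'N') := rfl
      unfold taxiHeadOf taxiDir; rw [hmod]; simp [hstep]
    · have hmod : PySem.Int.mod t 4 = 1 := hm.trans h
      have hstep : taxiStepA (p, 'W') 'F' = ((p.1 + -1, p.2 + 0), 'W') := rfl
      unfold taxiHeadOf taxiDir; rw [hmod]; simp [hstep]
    · have hmod : PySem.Int.mod t 4 = 2 := hm.trans h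
      have hstep : taxiStepA (p, 'S') 'F' = ((p.1 + 0, p.2 + -1), 'S') := rfl
      unfold taxiHeadOf taxiDir; rw [hmod]; simp [hstep]
    · have hmod : PySem.Int.mod t 4 = 3 := hm.trans h
      have hstep : taxiStepA (p, 'E') 'F' = ((p.1 + 1, p.2 + 0), 'E') := rfl
      unfold taxiHeadOf taxiDir; rw [hmod]; simp [hstep]
  · by_cases hL : c = 'L'
    · subst hL
      have ht : t + taxiTurn 'L' = t + 1 := by simp [taxiTurn]
      rw [ht]
      rcases hr with h | h | h | h
      · have hmod : PySem.Int.mod t 4 = 0 := hm.trans h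
        have h1 : PySem.Int.mod (t + 1) 4 = 1 := by rw [taxi_mod4]; omega
        have hstep : taxiStepA (p, 'N') 'L' = (p, 'W') := rfl
        unfold taxiHeadOf; rw [hmod, h1]; simp [hstep]
      · have hmod : PySem.Int.mod t 4 = 1 := hm.trans h
        have h1 : PySem.Int.mod (t + 1) 4 = 2 := by rw [taxi_mod4]; omega
        have hstep : taxiStepA (p, 'W') 'L' = (p, 'S') := rfl
        unfold taxiHeadOf; rw [hmod, h1]; simp [hstep]
      · have hmod : PySem.Int.mod t 4 = 2 := hm.trans h
        have h1 : PySem.Int.mod (t + 1) 4 = 3 := by rw [taxi_mod4]; omega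
        have hstep : taxiStepA (p, 'S') 'L' = (p, 'E') := rfl
        unfold taxiHeadOf; rw [hmod, h1]; simp [hstep]
      · have hmod : PySem.Int.mod t 4 = 3 := hm.trans h
        have h1 : PySem.Int.mod (t + 1) 4 = 0 := by rw [taxi_mod4]; omega
        have hstep : taxiStepA (p, 'E') 'L' = (p, 'N') := rfl
        unfold taxiHeadOf; rw [hmod, h1]; simp [hstep]
    · by_cases hR : c = 'R'
      · subst hR
        have ht : t + taxiTurn 'R' = t - 1 := by simp [taxiTurn]; omega
        rw [ht]
        rcases hr with h | h | h | h
        · have hmod : PySem.Int.mod t 4 = 0 := hm.trans h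
          have h1 : PySem.Int.mod (t - 1) 4 = 3 := by rw [taxi_mod4]; omega
          have hstep : taxiStepA (p, 'N') 'R' = (p, 'E') := rfl
          unfold taxiHeadOf; rw [hmod, h1]; simp [hstep]
        · have hmod : PySem.Int.mod t 4 = 1 := hm.trans h
          have h1 : PySem.Int.mod (t - 1) 4 = 0 := by rw [taxi_mod4]; omega
          have hstep : taxiStepA (p, 'W') 'R' = (p, 'N') := rfl
          unfold taxiHeadOf; rw [hmod, h1]; simp [hstep]
        · have hmod : PySem.Int.mod t 4 = 2 := hm.trans h
          have h1 : PySem.Int.mod (t - 1) 4 = 1 := by rw [taxi_mod4]; omega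
          have hstep : taxiStepA (p, 'S') 'R' = (p, 'W') := rfl
          unfold taxiHeadOf; rw [hmod, h1]; simp [hstep]
        · have hmod : PySem.Int.mod t 4 = 3 := hm.trans h
          have h1 : PySem.Int.mod (t - 1) 4 = 2 := by rw [taxi_mod4]; omega
          have hstep : taxiStepA (p, 'E') 'R' = (p, 'S') := rfl
          unfold taxiHeadOf; rw [hmod, h1]; simp [hstep]
      · have ht : t + taxiTurn c = t := by simp [taxiTurn, hL, hR]
        rw [ht]
        have hitems : taxiVectorAdjust.items =
            [('L', PySem.Dict.ofList [('N', 'W'), ('S', 'E'), ('E', 'N'), ('W', 'S')]),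
             ('R', PySem.Dict.ofList [('N', 'E'), ('S', 'W'), ('E', 'S'), ('W', 'N')])] := rfl
        have hc : taxiVectorAdjust.contains c = false := by
          simp [PySem.Dict.contains, hitems]
          constructor
          · intro h; exact hL h.symm
          · intro h; exact hR h.symm
        simp [taxiStepA, hF, hc]

lemma taxi_foldA (l : List Char) (p : Int × Int) (t : Int) :
    (l.foldl taxiStepA (p, taxiHeadOf t)).1 =
      (p.1 + (taxiRef l t).1, p.2 + (taxiRef l t).2) := by
  induction l generalizing p t with
  | nil => simp [taxiRef]
  | cons c l ih =>
    simp only [List.foldl_cons, taxi_stepA_eq, taxiRef]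
    rw [ih]
    simp [add_assoc]

lemma taxi_foldB (l : List Char) (t a b d e : Int) :
    ((l.zip (taxiHeadsFrom t l)).foldl taxiTally [a, b, d, e]).getD 3 0 -
        ((l.zip (taxiHeadsFrom t l)).foldl taxiTally [a, b, d, e]).getD 1 0 =
      e - b + (taxiRef l t).1 ∧
    ((l.zip (taxiHeadsFrom t l)).foldl taxiTally [a, b, d, e]).getD 0 0 -
        ((l.zip (taxiHeadsFrom t l)).foldl taxiTally [a, b, d, e]).getD 2 0 =
      a - d + (taxiRef l t).2 := by
  induction l generalizing t a b d e with
  | nil => simp [taxiHeadsFrom, taxiRef]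
  | cons c l ih =>
    have hzip : (c :: l).zip (taxiHeadsFrom t (c :: l)) =
        (c, t) :: l.zip (taxiHeadsFrom (t + taxiTurn c) l) := by
      simp [taxiHeadsFrom]
    have hb : 0 ≤ t % 4 ∧ t % 4 < 4 := ⟨Int.emod_nonneg t (by norm_num), Int.emod_lt_of_pos t (by norm_num)⟩
    have hr : t % 4 = 0 ∨ t % 4 = 1 ∨ t % 4 = 2 ∨ t % 4 = 3 := by omega
    by_cases hF : c = 'F'
    · subst hF
      have ht : t + taxiTurn 'F' = t := by simp [taxiTurn]
      rcases hr with h | h | h | h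
      · have hmod : PySem.Int.mod t 4 = 0 := (taxi_mod4 t).trans h
        have hstep : taxiTally [a, b, d, e] ('F', t) = [a + 1, b, d, e] := by
          simp [taxiTally, h]
        have hrec := ih t (a + 1) b d e
        simp only [hzip, ht, List.foldl_cons, hstep, taxiRef, hmod, taxiDir]
        simp only [List.getD] at hrec ⊢
        norm_num at hrec ⊢
        omega
      · have hmod : PySem.Int.mod t 4 = 1 := (taxi_mod4 t).trans h
        have hstep : taxiTally [a, b, d, e] ('F', t) = [a, b + 1, d, e] := by
          simp [taxiTally, h]
        have hrec := ih t a (b + 1) d e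
        simp only [hzip, ht, List.foldl_cons, hstep, taxiRef, hmod, taxiDir]
        simp only [List.getD] at hrec ⊢
        norm_num at hrec ⊢
        omega
      · have hmod : PySem.Int.mod t 4 = 2 := (taxi_mod4 t).trans h
        have hstep : taxiTally [a, b, d, e] ('F', t) = [a, b, d + 1, e] := by
          simp [taxiTally, h]
        have hrec := ih t a b (d + 1) e
        simp only [hzip, ht, List.foldl_cons, hstep, taxiRef, hmod, taxiDir]
        simp only [List.getD] at hrec ⊢
        norm_num at hrec ⊢
        omega
      · have hmod : PySem.Int.mod t 4 = 3 := (taxi_mod4 t).trans h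
        have hstep : taxiTally [a, b, d, e] ('F', t) = [a, b, d, e + 1] := by
          simp [taxiTally, h]
        have hrec := ih t a b d (e + 1)
        simp only [hzip, ht, List.foldl_cons, hstep, taxiRef, hmod, taxiDir]
        simp only [List.getD] at hrec ⊢
        norm_num at hrec ⊢
        omega
    · have hstep : taxiTally [a, b, d, e] (c, t) = [a, b, d, e] := by
        simp [taxiTally, hF]
      have hrec := ih (t + taxiTurn c) a b d e
      simp only [hzip, List.foldl_cons, hstep]
      simp only [taxiRef, if_neg hF]
      simp only [List.getD] at hrec ⊢
      norm_num at hrec ⊢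
      omega

-- ===== VERDICT (by name: the statement is the Claim_ definition above) =====
theorem taxi_zum_zum_spec : Claim_equal_taxi_zum_zum := by
  intro moves _
  unfold Spec_taxi_zum_zum taxi_zum_zum taxi_zum_zum_alt
  have hN : taxiHeadOf 0 = 'N' := rfl
  have hA := taxi_foldA moves.toList (0, 0) 0
  rw [hN] at hA
  have hB := taxi_foldB moves.toList 0 0 0 0 0
  simp only [List.getD] at hB
  norm_num at hB
  rw [hA]
  obtain ⟨h1, h2⟩ := hB
  refine Prod.ext ?_ ?_ <;> simp <;> omega
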